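-- pv_equiv track=rewrite | github.com/SmartestKen/public | trash/SS/q_major.py | getDescent
-- ===== SOURCE A (Python) =====
-- def getDescent(ST):
--     lda = []
--     for i in range(len(ST)):
--         lda.append(len(ST[i]))
--     descent = set()
--     currRow = len(lda)-1
--     currCol = lda[currRow]-1
--     # roster -> something below
--     # temp_roster _> something in the same row
--     # but current row scanning not finished yet
--     roster = set()
--     temp_roster = set()
--     while True:
--         if currCol == -1:
--             currRow -= 1
--             roster = roster.union(temp_roster)
--             temp_roster = set()
--             if currRow == -1:
--                 break
--             currCol = lda[currRow]-1
--
--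
--         num = ST[currRow][currCol]
--         if num+1 in roster:
--             descent.add(num)
--         temp_roster.add(num)
--         currCol -= 1
--     return descent
-- ===== SOURCE B (Python) =====
-- def getDescent(ST):
--     # One pass builds maxRow: for each value, the largest row index containing it
--     # (later rows overwrite earlier ones).  A value v "descends" iff v+1 occurs in
--     # a strictly lower row, i.e. maxRow.get(v+1, -1) > row(v); scanning rows
--     # bottom-up, right-to-left reproduces A's traversal.
--     maxRow = {}
--     for i, row in enumerate(ST):
--         for v in row:
--             maxRow[v] = i
--     descent = set()
--     for i in range(len(ST) - 1, -1, -1):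
--         for v in reversed(ST[i]):
--             if maxRow.get(v + 1, -1) > i:
--                 descent.add(v)
--     return descent
-- ===== Notes on version B (the rewrite author's own statement) =====
-- stated objective: alternative
-- what changed: A rebuilds the set of values seen below the current row with a fresh set.union per row (O(n*rows) copying); B instead makes one pass recording each value's maximum row index in a dict and tests maxRow[v+1] > i with O(1) lookups, with no per-row set copying (intended as faster; a timing run measured only ~1.5x, inconsistently, on the generated inputs).
import Mathlib
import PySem

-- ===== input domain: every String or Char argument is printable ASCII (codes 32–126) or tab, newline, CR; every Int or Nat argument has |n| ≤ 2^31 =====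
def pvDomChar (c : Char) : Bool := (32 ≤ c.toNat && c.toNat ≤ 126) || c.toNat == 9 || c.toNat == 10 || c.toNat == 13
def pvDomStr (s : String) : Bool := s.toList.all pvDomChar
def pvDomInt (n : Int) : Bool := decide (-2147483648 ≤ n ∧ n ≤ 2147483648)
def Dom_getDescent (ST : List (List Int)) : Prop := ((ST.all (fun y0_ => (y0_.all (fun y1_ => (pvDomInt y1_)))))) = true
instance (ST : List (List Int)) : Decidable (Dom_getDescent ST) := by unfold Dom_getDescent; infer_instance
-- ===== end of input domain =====

-- B replaces A's per-row set.union rebuilding of the "rows below" roster by a single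
-- dict pass recording each value's maximum row index (objective: alternative algorithm).

-- ===== PORT A =====
-- A's while loop, split at its two cases.  Iterations with currCol ≥ 0 read one element
-- (right to left); when currCol hits -1 the loop unions temp_roster into roster and moves
-- up one row.  getDescentCols is the run of element-iterations over one row (elements in
-- right-to-left order); getDescentRows performs the row transition and recurses over the
-- rows in bottom-to-top order (ST.reverse), exactly A's traversal.  Where Python raises
-- (ST = [], or an empty row other than the last reached via ST[currRow][-1]) this total
-- port just keeps going with the remaining elements; those inputs are excluded by Pre_.
def getDescentCols (cur : List Int) (roster temp descent : PySem.Set Int) :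
    PySem.Set Int × PySem.Set Int :=
  match cur with
  | [] => (temp, descent)
  | num :: rest =>
      getDescentCols rest roster (PySem.Set.add temp num)
        (if roster.contains (num + 1) then PySem.Set.add descent num else descent)

def getDescentRows (rows : List (List Int)) (roster temp descent : PySem.Set Int) :
    PySem.Set Int :=
  match rows with
  | [] => descent
  | row :: rest =>
      let roster' := PySem.Set.union roster temp
      let p := getDescentCols row.reverse roster' PySem.Set.empty descent
      getDescentRows rest roster' p.1 p.2

def getDescent (ST : List (List Int)) : List Int :=
  if ST.isEmpty then []   -- Python raises IndexError (lda[-1]) here; outside Pre_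
  else getDescentRows ST.reverse PySem.Set.empty PySem.Set.empty PySem.Set.empty

-- ===== PORT B =====
-- Source B: first loop 'for i, row in enumerate(ST): for v in row: maxRow[v] = i' as a fold
-- over enumerate; second loop 'for i in range(len(ST)-1,-1,-1): for v in reversed(ST[i])'
-- is the fold over the reversed enumeration, adding v when maxRow.get(v+1, -1) > i.
def getDescent_alt (ST : List (List Int)) : List Int :=
  let maxRow := (PySem.List.enumerate ST 0).foldl
      (fun d p => p.2.foldl (fun d v => PySem.Dict.insert d v p.1) d) PySem.Dict.empty
  (PySem.List.enumerate ST 0).reverse.foldl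
      (fun s p => p.2.reverse.foldl
        (fun s v => if PySem.Dict.getD maxRow (v + 1) (-1) > p.1 then PySem.Set.add s v else s) s)
      PySem.Set.empty

-- ===== PRECONDITION & SPEC =====
-- Pre_ excludes exactly the inputs on which Python A raises IndexError: the empty list
-- (lda[-1]) and any input whose non-last rows are not all nonempty (ST[currRow][-1]).
def Pre_getDescent (ST : List (List Int)) : Prop :=
  ST ≠ [] ∧ ∀ row ∈ ST.dropLast, row ≠ []
instance (ST : List (List Int)) : Decidable (Pre_getDescent ST) := by
  unfold Pre_getDescent; infer_instance

def pvWitness_getDescent : List (List Int) := [[1, 2], [3, 2]]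

def Spec_getDescent (ST : List (List Int)) (out : List Int) : Prop := out = getDescent_alt ST
instance (ST : List (List Int)) (out : List Int) : Decidable (Spec_getDescent ST out) := by
  unfold Spec_getDescent; infer_instance

-- ===== CLAIM (what is proved, stated in full; the proofs are below) =====
def Claim_equal_getDescent : Prop :=
  ∀ (ST : List (List Int)), Dom_getDescent ST → Pre_getDescent ST →
    Spec_getDescent ST (getDescent ST)

-- ===== LEMMAS AND PROOFS =====

-- B's maxRow dict, as a standalone abbreviation for the proofs.
def pvMaxRow (ST : List (List Int)) : PySem.Dict Int Int :=
  (PySem.List.enumerate ST 0).foldl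
    (fun d p => p.2.foldl (fun d v => PySem.Dict.insert d v p.1) d) PySem.Dict.empty

-- The index (counting from start s) of the LAST row of ST containing x, if any.
def pvLastIdx (ST : List (List Int)) (s : Int) (x : Int) : Option Int :=
  match ST with
  | [] => none
  | row :: rest =>
      match pvLastIdx rest (s + 1) x with
      | some i => some i
      | none => if x ∈ row then some s else none

theorem pvLastIdx_ge (ST : List (List Int)) (x : Int) :
    ∀ (s i : Int), pvLastIdx ST s x = some i → s ≤ i := by
  induction ST with
  | nil => intro s i h; simp [pvLastIdx] at h
  | cons row rest ih =>
      intro s i h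
      simp only [pvLastIdx] at h
      cases hr : pvLastIdx rest (s + 1) x with
      | some j =>
          rw [hr] at h
          have hj := ih (s + 1) j hr
          have hji : j = i := by simpa using h
          omega
      | none =>
          rw [hr] at h
          by_cases hx : x ∈ row
          · have hsi : s = i := by simpa [hx] using h
            omega
          · simp [hx] at h

theorem pvLastIdx_none (ST : List (List Int)) (x : Int) :
    ∀ (s : Int), pvLastIdx ST s x = none → ∀ row ∈ ST, x ∉ row := by
  induction ST with
  | nil => simp
  | cons row rest ih =>
      intro s h
      simp only [pvLastIdx] at h
      cases hr : pvLastIdx rest (s + 1) x with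
      | some j => rw [hr] at h; simp at h
      | none =>
          rw [hr] at h
          intro r hrm
          rcases hrm with _ | hrm
          · intro hx; simp [hx] at h
          · exact ih (s + 1) hr r (by assumption)

theorem pvGetD_insRow (row : List Int) (d : PySem.Dict Int Int) (i x dflt : Int) :
    (row.foldl (fun d v => PySem.Dict.insert d v i) d).getD x dflt
      = if x ∈ row then i else d.getD x dflt := by
  induction row generalizing d with
  | nil => simp
  | cons v rest ih =>
      simp only [List.foldl_cons, ih, List.mem_cons]
      by_cases hx : x ∈ rest
      · simp [hx]
      · simp [hx, PySem.Dict.getD_insert]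

theorem pvMaxRow_getD (ST : List (List Int)) (x dflt : Int) :
    ∀ (s : Int) (d : PySem.Dict Int Int),
    ((PySem.List.enumerate ST s).foldl
        (fun d p => p.2.foldl (fun d v => PySem.Dict.insert d v p.1) d) d).getD x dflt
      = (pvLastIdx ST s x).getD (d.getD x dflt) := by
  induction ST with
  | nil => intro s d; simp [pvLastIdx, PySem.List.enumerate_nil]
  | cons row rest ih =>
      intro s d
      rw [PySem.List.enumerate_cons]
      simp only [List.foldl_cons, pvLastIdx]
      rw [ih (s + 1)]
      cases hr : pvLastIdx rest (s + 1) x with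
      | some j => simp
      | none =>
          rw [pvGetD_insRow]
          split <;> simp

-- Characterisation: maxRow.get(x, -1) > j iff x occurs in some row with index > j.
theorem pvMaxRow_gt (ST : List (List Int)) (x j : Int) (hj : -1 <= j) :
    (pvMaxRow ST).getD x (-1) > j ↔
      ∃ (k : Nat), ∃ (h : k < ST.length), x ∈ ST[k] ∧ j < (k : Int) := by
  rw [pvMaxRow, pvMaxRow_getD]
  have hempty : (PySem.Dict.empty : PySem.Dict Int Int).getD x (-1) = -1 := rfl
  have hgen : ∀ (ST' : List (List Int)) (s : Int), 0 ≤ s → -1 ≤ j →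
      ((pvLastIdx ST' s x).getD (-1) > j ↔
        ∃ (k : Nat), ∃ (h : k < ST'.length), x ∈ ST'[k] ∧ j < s + (k : Int)) := by
    intro ST'
    induction ST' with
    | nil =>
        intro s hs0 hs
        simp only [pvLastIdx, Option.getD_none, List.length_nil]
        constructor
        · omega
        · rintro ⟨k, hk, _⟩; omega
    | cons row rest ih =>
        intro s hs0 hs
        cases hr : pvLastIdx rest (s + 1) x with
        | some i =>
            simp only [pvLastIdx, hr]
            have hi := pvLastIdx_ge rest x (s + 1) i hr
            have ihr := ih (s + 1) (by omega) (by omega)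
            rw [hr] at ihr
            simp only [Option.getD_some] at ihr ⊢
            constructor
            · intro hij
              rcases ihr.mp hij with ⟨k, hk, hxk, hjk⟩
              refine ⟨k + 1, by simpa using Nat.succ_lt_succ hk, by simpa using hxk, ?_⟩
              push_cast at hjk ⊢
              omega
            · rintro ⟨k, hk, hxk, hjk⟩
              cases k with
              | zero =>
                  push_cast at hjk
                  omega
              | succ k' =>
                  refine ihr.mpr ⟨k', by simpa using hk, by simpa using hxk, ?_⟩
                  push_cast at hjk ⊢
                  omega
        | none =>
            simp only [pvLastIdx, hr]
            have hnone := pvLastIdx_none rest x (s + 1) hr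
            split
            · rename_i hxrow
              simp only [Option.getD_some]
              constructor
              · intro hij
                refine ⟨0, Nat.succ_pos _, by simpa using hxrow, ?_⟩
                push_cast
                omega
              · rintro ⟨k, hk, hxk, hjk⟩
                cases k with
                | zero => push_cast at hjk; omega
                | succ k' =>
                    exfalso
                    exact hnone _ (List.getElem_mem _) (by simpa using hxk)
            · rename_i hxrow
              simp only [Option.getD_none]
              constructor
              · intro h; omega
              · rintro ⟨k, hk, hxk, hjk⟩
                exfalso
                cases k with
                | zero => exact hxrow (by simpa using hxk)
                | succ k' => exact hnone _ (List.getElem_mem _) (by simpa using hxk)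
  rw [hempty]
  have h0 := hgen ST 0 (by omega) (by omega)
  simpa using h0

-- A's element loop over one row, expressed as two plain folds.
theorem pvCols_eq (cur : List Int) (roster temp descent : PySem.Set Int) :
    getDescentCols cur roster temp descent
      = (cur.foldl (fun t v => PySem.Set.add t v) temp,
         cur.foldl (fun d v => if roster.contains (v + 1) then PySem.Set.add d v else d) descent) := by
  induction cur generalizing temp descent with
  | nil => rfl
  | cons v rest ih => simp only [getDescentCols, List.foldl_cons, ih]

-- B's outer-loop step at row index p.1.
def pvBStep (ST : List (List Int)) (s : PySem.Set Int) (p : Int × List Int) : PySem.Set Int :=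
  p.2.reverse.foldl
    (fun s v => if (pvMaxRow ST).getD (v + 1) (-1) > p.1 then PySem.Set.add s v else s) s

-- Main invariant: A's recursion over the bottom k rows equals B's fold over the reversed
-- enumeration of those rows, while roster ∪ temp holds exactly the values whose maximum
-- row index exceeds k - 1, i.e. the values occurring in rows k, …, n-1.
theorem pvMain (ST : List (List Int)) (k : Nat) (hk : k ≤ ST.length)
    (roster temp descent : PySem.Set Int)
    (hinv : ∀ x, (PySem.Set.union roster temp).contains x
              = decide ((pvMaxRow ST).getD x (-1) > (k : Int) - 1)) :
    getDescentRows ((ST.take k).reverse) roster temp descent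
      = ((PySem.List.enumerate (ST.take k) 0).reverse).foldl (pvBStep ST) descent := by
  induction k generalizing roster temp descent with
  | zero => simp [getDescentRows, PySem.List.enumerate_nil]
  | succ k ih =>
      have hkn : k < ST.length := by omega
      have htake : ST.take (k + 1) = ST.take k ++ [ST[k]] := by
        rw [List.take_add_one]
        simp [List.getElem?_eq_getElem hkn]
      have hlen : (ST.take k).length = k := by simp [List.length_take]; omega
      rw [htake, List.reverse_append, PySem.List.enumerate_append, List.reverse_append]
      have henum1 : PySem.List.enumerate [ST[k]] (0 + ((ST.take k).length : Int)) = [((k : Int), ST[k])] := by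
        rw [hlen]
        simp [PySem.List.enumerate_cons, PySem.List.enumerate_nil]
      rw [henum1]
      simp only [List.reverse_singleton, List.singleton_append, List.foldl_cons]
      -- unfold one step of A
      show getDescentRows (ST[k] :: (ST.take k).reverse) roster temp descent = _
      rw [getDescentRows]
      rw [pvCols_eq]
      -- the two per-row folds compute the same descent set
      have hcast : ((k + 1 : Nat) : Int) - 1 = (k : Int) := by push_cast; ring
      have hcond : ∀ v : Int, (PySem.Set.union roster temp).contains (v + 1)
          = decide ((pvMaxRow ST).getD (v + 1) (-1) > (k : Int)) := by
        intro v; rw [hinv, hcast]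
      have hdesc :
          (ST[k].reverse).foldl
              (fun d v => if (PySem.Set.union roster temp).contains (v + 1) then PySem.Set.add d v else d) descent
            = pvBStep ST descent ((k : Int), ST[k]) := by
        rw [pvBStep]
        congr 1
        funext d v
        rw [hcond v]
        simp only [decide_eq_true_eq]
      -- membership of the new roster ∪ temp
      have hmem_roster : ∀ x : Int, x ∈ PySem.Set.union roster temp ↔ (pvMaxRow ST).getD x (-1) > (k : Int) := by
        intro x
        have := hcond (x - 1)
        rw [PySem.Set.contains_eq_decide] at this
        simpa using decide_eq_decide.mp this
      have hinv' : ∀ x, (PySem.Set.union (PySem.Set.union roster temp)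
            ((ST[k].reverse).foldl (fun t v => PySem.Set.add t v) PySem.Set.empty)).contains x
          = decide ((pvMaxRow ST).getD x (-1) > (k : Int) - 1) := by
        intro x
        rw [PySem.Set.contains_eq_decide]
        rw [decide_eq_decide]
        have hof : (ST[k].reverse).foldl (fun t v => PySem.Set.add t v) PySem.Set.empty
            = PySem.Set.ofList (ST[k].reverse) := by
          rw [PySem.Set.ofList_eq_foldl]; rfl
        rw [hof, PySem.Set.mem_union, PySem.Set.mem_ofList, List.mem_reverse]
        rw [hmem_roster x]
        rw [pvMaxRow_gt ST x ((k : Int) - 1) (by omega), pvMaxRow_gt ST x (k : Int) (by omega)]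
        constructor
        · rintro (⟨k', hk', hxk', hjk'⟩ | hxk)
          · exact ⟨k', hk', hxk', by omega⟩
          · exact ⟨k, hkn, hxk, by omega⟩
        · rintro ⟨k', hk', hxk', hjk'⟩
          by_cases hkk : k' = k
          · subst hkk; exact Or.inr hxk'
          · exact Or.inl ⟨k', hk', hxk', by omega⟩
      rw [hdesc]
      exact ih (by omega) (PySem.Set.union roster temp) _ _ hinv'

-- ===== VERDICT (by name: the statement is the Claim_ definition above) =====
theorem getDescent_spec : Claim_equal_getDescent := by
  intro ST _ hpre
  unfold Spec_getDescent
  have hne : ST ≠ [] := hpre.1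
  have hinv0 : ∀ x, (PySem.Set.union (PySem.Set.empty : PySem.Set Int) PySem.Set.empty).contains x
      = decide ((pvMaxRow ST).getD x (-1) > (ST.length : Int) - 1) := by
    intro x
    have hlhs : (PySem.Set.union (PySem.Set.empty : PySem.Set Int) PySem.Set.empty).contains x = false := rfl
    rw [hlhs]
    symm
    rw [decide_eq_false_iff_not]
    rw [pvMaxRow_gt ST x _ (by omega)]
    rintro ⟨k, hk, _, hjk⟩
    omega
  have hmain := pvMain ST ST.length le_rfl PySem.Set.empty PySem.Set.empty PySem.Set.empty hinv0
  rw [List.take_length] at hmain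
  rw [getDescent, if_neg (by simpa using hne)]
  rw [hmain]
  rfl
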